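-- pv_equiv track=rewrite | github.com/leeyang1991/bnu_project05 | recovery_time_branch.py | pick_growing_season_vals
-- ===== SOURCE A (Python) =====
-- def pick_growing_season_vals(arr, spei_min_index, growing_season_range):
--     # 获取当前生长季的index
--     year = int(spei_min_index / 12)
--     select_vals = []
--     select_index = []
--     for i in range(0, 12):
--         s_index = spei_min_index + i
--         s_mon = s_index % 12 + 1
--         s_year = int(s_index / 12)
--         if (s_year == year or s_year == (year + 1)) and s_mon in growing_season_range:
--             select_index.append(spei_min_index + i)
--             select_vals.append(arr[spei_min_index + i])
--
--         # s_mon = mon + i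
--         # if s_mon in growing_season_range:
--         #     select_index.append(spei_min_index+i)
--         #     select_vals.append(arr[spei_min_index+i])
--     return select_index, select_vals
-- ===== SOURCE B (Python) =====
-- def pick_growing_season_vals(arr, spei_min_index, growing_season_range):
--     # Map each growing-season month directly to its offset from spei_min_index,
--     # instead of scanning all 12 offsets and testing membership.
--     r = spei_min_index % 12
--     offsets = sorted({(m - 1 - r) % 12 for m in growing_season_range if 1 <= m <= 12})
--     select_index = [spei_min_index + o for o in offsets]
--     select_vals = [arr[j] for j in select_index]
--     return select_index, select_vals
-- ===== Notes on version B (the rewrite author's own statement) =====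
-- stated objective: faster
-- what changed: B maps each growing-season month (1..12) directly to its offset from spei_min_index via modular arithmetic, deduplicates with a set and sorts the at most 12 offsets, instead of A's scan over all 12 offsets each performing a membership test over growing_season_range plus a (vacuous) year check.
import Mathlib
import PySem

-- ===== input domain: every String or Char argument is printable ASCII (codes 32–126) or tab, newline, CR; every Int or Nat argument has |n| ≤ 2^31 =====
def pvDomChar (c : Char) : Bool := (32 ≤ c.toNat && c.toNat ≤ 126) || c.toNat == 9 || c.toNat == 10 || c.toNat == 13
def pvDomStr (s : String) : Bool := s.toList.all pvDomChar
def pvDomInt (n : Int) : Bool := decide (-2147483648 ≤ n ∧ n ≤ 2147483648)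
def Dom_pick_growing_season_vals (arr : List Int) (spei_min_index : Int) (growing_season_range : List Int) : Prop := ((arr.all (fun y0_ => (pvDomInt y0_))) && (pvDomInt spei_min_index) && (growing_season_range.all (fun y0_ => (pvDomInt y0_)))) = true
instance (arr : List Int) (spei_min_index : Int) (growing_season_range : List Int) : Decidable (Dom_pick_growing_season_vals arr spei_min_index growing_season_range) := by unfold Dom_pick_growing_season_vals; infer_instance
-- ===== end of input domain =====

-- B replaces A's scan over all 12 offsets (each doing a membership test over growing_season_range)
-- by mapping each growing-season month directly to its offset, deduplicating and sorting; measured faster (constant factor).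


-- ===== PORT A =====
def pick_growing_season_vals (arr : List Int) (spei_min_index : Int) (growing_season_range : List Int) : List Int × List Int :=
  let year := PySem.Int.truncdiv spei_min_index 12
  let res := (PySem.List.pyRange 0 12 1).foldl (fun (acc : List Int × List Int) i =>
      let s_index := spei_min_index + i
      let s_mon := PySem.Int.mod s_index 12 + 1
      let s_year := PySem.Int.truncdiv s_index 12
      if (s_year = year ∨ s_year = year + 1) ∧ s_mon ∈ growing_season_range then
        (acc.1 ++ [spei_min_index + i], acc.2 ++ [PySem.List.pyGetD arr (spei_min_index + i) 0])
      else acc) ([], [])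
  (res.1, res.2)

-- ===== PORT B =====
def pick_growing_season_vals_alt (arr : List Int) (spei_min_index : Int) (growing_season_range : List Int) : List Int × List Int :=
  let r := PySem.Int.mod spei_min_index 12
  let offsets := PySem.List.sorted
      (PySem.Set.ofList ((growing_season_range.filter (fun m => decide (1 ≤ m) && decide (m ≤ 12))).map
        (fun m => PySem.Int.mod (m - 1 - r) 12))) (fun x => x) false
  let select_index := offsets.map (fun o => spei_min_index + o)
  let select_vals := select_index.map (fun j => PySem.List.pyGetD arr j 0)
  (select_index, select_vals)

-- ===== PRECONDITION & SPEC =====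
-- Pre_ excludes exactly the inputs where Python A raises IndexError: some selected index
-- spei_min_index+i (growing-season month, i in 0..11) falls outside arr's Python index range.
def Pre_pick_growing_season_vals (arr : List Int) (spei_min_index : Int) (growing_season_range : List Int) : Prop :=
  ∀ i ∈ PySem.List.pyRange 0 12 1,
    (PySem.Int.mod (spei_min_index + i) 12 + 1) ∈ growing_season_range →
    PySem.Raise.InRange arr.length (spei_min_index + i)
instance (arr : List Int) (spei_min_index : Int) (growing_season_range : List Int) : Decidable (Pre_pick_growing_season_vals arr spei_min_index growing_season_range) := by unfold Pre_pick_growing_season_vals; infer_instance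

def pvWitness_pick_growing_season_vals : List Int × Int × List Int :=
  ([3, 1, 4, 1, 5, 9, 2, 6, 5, 3, 5, 8], 0, [4, 5, 6])

def Spec_pick_growing_season_vals (arr : List Int) (spei_min_index : Int) (growing_season_range : List Int) (out : List Int × List Int) : Prop := out = pick_growing_season_vals_alt arr spei_min_index growing_season_range
instance (arr : List Int) (spei_min_index : Int) (growing_season_range : List Int) (out : List Int × List Int) : Decidable (Spec_pick_growing_season_vals arr spei_min_index growing_season_range out) := by unfold Spec_pick_growing_season_vals; infer_instance

-- ===== CLAIM (what is proved, stated in full; the proofs are below) =====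
def Claim_equal_pick_growing_season_vals : Prop := ∀ (arr : List Int) (spei_min_index : Int) (growing_season_range : List Int), Dom_pick_growing_season_vals arr spei_min_index growing_season_range → Pre_pick_growing_season_vals arr spei_min_index growing_season_range → Spec_pick_growing_season_vals arr spei_min_index growing_season_range (pick_growing_season_vals arr spei_min_index growing_season_range)

-- ===== LEMMAS AND PROOFS =====

-- the common canonical list of selected offsets: i in 0..11 whose month lies in the growing season
def pvGsOffsets (m : Int) (gsr : List Int) : List Int :=
  (PySem.List.pyRange 0 12 1).filter (fun i => decide ((PySem.Int.mod (m + i) 12 + 1) ∈ gsr))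

-- the year test in A is always true for offsets 0..11
lemma pv_year_true (m i : Int) (h0 : 0 ≤ i) (h1 : i < 12) :
    PySem.Int.truncdiv (m + i) 12 = PySem.Int.truncdiv m 12 ∨
    PySem.Int.truncdiv (m + i) 12 = PySem.Int.truncdiv m 12 + 1 := by
  simp only [PySem.Int.truncdiv]
  rw [Int.tdiv_eq_ediv, Int.tdiv_eq_ediv]
  have h : (12:Int).sign = 1 := rfl
  rw [h]; omega

lemma pv_A_eq (arr : List Int) (m : Int) (gsr : List Int) :
    pick_growing_season_vals arr m gsr =
      ((pvGsOffsets m gsr).map (fun i => m + i),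
       (pvGsOffsets m gsr).map (fun i => PySem.List.pyGetD arr (m + i) 0)) := by
  have step1 : ∀ (acc : List Int × List Int), ∀ i ∈ PySem.List.pyRange 0 12 1,
      (fun (acc : List Int × List Int) i =>
        if (PySem.Int.truncdiv (m + i) 12 = PySem.Int.truncdiv m 12 ∨
            PySem.Int.truncdiv (m + i) 12 = PySem.Int.truncdiv m 12 + 1) ∧
            PySem.Int.mod (m + i) 12 + 1 ∈ gsr then
          (acc.1 ++ [m + i], acc.2 ++ [PySem.List.pyGetD arr (m + i) 0])
        else acc) acc i
      = (fun (acc : List Int × List Int) i =>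
          (if PySem.Int.mod (m + i) 12 + 1 ∈ gsr then acc.1 ++ [m + i] else acc.1,
           if PySem.Int.mod (m + i) 12 + 1 ∈ gsr then acc.2 ++ [PySem.List.pyGetD arr (m + i) 0] else acc.2)) acc i := by
    intro acc i hi
    have hy := pv_year_true m i ((PySem.List.mem_pyRange_one.mp hi).1) ((PySem.List.mem_pyRange_one.mp hi).2)
    by_cases hmem : PySem.Int.mod (m + i) 12 + 1 ∈ gsr
    · simp only [if_pos (And.intro hy hmem), if_pos hmem]
    · simp only [if_neg (fun h : _ ∧ _ => hmem h.2), if_neg hmem]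
  have h2 := PySem.List.foldl_congr_mem (PySem.List.pyRange 0 12 1)
      (fun (acc : List Int × List Int) i =>
        if (PySem.Int.truncdiv (m + i) 12 = PySem.Int.truncdiv m 12 ∨
            PySem.Int.truncdiv (m + i) 12 = PySem.Int.truncdiv m 12 + 1) ∧
            PySem.Int.mod (m + i) 12 + 1 ∈ gsr then
          (acc.1 ++ [m + i], acc.2 ++ [PySem.List.pyGetD arr (m + i) 0])
        else acc)
      (fun (acc : List Int × List Int) i =>
        (if PySem.Int.mod (m + i) 12 + 1 ∈ gsr then acc.1 ++ [m + i] else acc.1,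
         if PySem.Int.mod (m + i) 12 + 1 ∈ gsr then acc.2 ++ [PySem.List.pyGetD arr (m + i) 0] else acc.2))
      ([], []) step1
  rw [show pick_growing_season_vals arr m gsr =
      (((PySem.List.pyRange 0 12 1).foldl (fun (acc : List Int × List Int) i =>
        if (PySem.Int.truncdiv (m + i) 12 = PySem.Int.truncdiv m 12 ∨
            PySem.Int.truncdiv (m + i) 12 = PySem.Int.truncdiv m 12 + 1) ∧
            PySem.Int.mod (m + i) 12 + 1 ∈ gsr then
          (acc.1 ++ [m + i], acc.2 ++ [PySem.List.pyGetD arr (m + i) 0])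
        else acc) ([], [])).1,
       ((PySem.List.pyRange 0 12 1).foldl (fun (acc : List Int × List Int) i =>
        if (PySem.Int.truncdiv (m + i) 12 = PySem.Int.truncdiv m 12 ∨
            PySem.Int.truncdiv (m + i) 12 = PySem.Int.truncdiv m 12 + 1) ∧
            PySem.Int.mod (m + i) 12 + 1 ∈ gsr then
          (acc.1 ++ [m + i], acc.2 ++ [PySem.List.pyGetD arr (m + i) 0])
        else acc) ([], [])).2) from rfl]
  rw [h2]
  rw [PySem.List.foldl_prod_mk
      (f := fun (a : List Int) i => if PySem.Int.mod (m + i) 12 + 1 ∈ gsr then a ++ [m + i] else a)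
      (g := fun (a : List Int) i => if PySem.Int.mod (m + i) 12 + 1 ∈ gsr then a ++ [PySem.List.pyGetD arr (m + i) 0] else a)]
  rw [PySem.List.foldl_append_ite (p := fun i => PySem.Int.mod (m + i) 12 + 1 ∈ gsr) (f := fun i => m + i),
      PySem.List.foldl_append_ite (p := fun i => PySem.Int.mod (m + i) 12 + 1 ∈ gsr)
        (f := fun i => PySem.List.pyGetD arr (m + i) 0)]
  rfl

lemma pv_mem_iff (m : Int) (gsr : List Int) (x : Int) :
    (x ∈ (PySem.Set.ofList ((gsr.filter (fun mo => decide (1 ≤ mo) && decide (mo ≤ 12))).map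
        (fun mo => PySem.Int.mod (mo - 1 - PySem.Int.mod m 12) 12)) : List Int))
    ↔ x ∈ pvGsOffsets m gsr := by
  have e : ∀ a : Int, PySem.Int.mod a 12 = a % 12 := fun a => PySem.Int.mod_eq_emod_of_pos (by omega)
  rw [PySem.Set.mem_ofList]
  unfold pvGsOffsets
  simp only [List.mem_map, List.mem_filter, PySem.List.mem_pyRange_one, e, decide_eq_true_iff,
    Bool.and_eq_true]
  constructor
  · rintro ⟨mo, ⟨hmem, h1, h2⟩, rfl⟩
    refine ⟨⟨by omega, by omega⟩, ?_⟩
    have h : (m + (mo - 1 - m % 12) % 12) % 12 + 1 = mo := by omega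
    rwa [h]
  · rintro ⟨⟨h0, h1⟩, hmem⟩
    exact ⟨(m + x) % 12 + 1, ⟨hmem, by omega, by omega⟩, by omega⟩

lemma pv_B_offsets (m : Int) (gsr : List Int) :
    PySem.List.sorted
      (PySem.Set.ofList ((gsr.filter (fun mo => decide (1 ≤ mo) && decide (mo ≤ 12))).map
        (fun mo => PySem.Int.mod (mo - 1 - PySem.Int.mod m 12) 12))) (fun x => x) false
    = pvGsOffsets m gsr := by
  apply PySem.List.sorted_eq_of_perm_of_pairwise_lt
  · apply (List.perm_ext_iff_of_nodup ?_ ?_).mpr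
    · intro x
      exact (pv_mem_iff m gsr x).symm
    · exact List.Nodup.filter _ (by decide)
    · exact PySem.Set.nodup_ofList _
  · exact List.Pairwise.filter _ (by decide)

-- ===== VERDICT (by name: the statement is the Claim_ definition above) =====
theorem pick_growing_season_vals_spec : Claim_equal_pick_growing_season_vals := by
  intro arr m gsr _ _
  unfold Spec_pick_growing_season_vals
  rw [pv_A_eq]
  simp only [pick_growing_season_vals_alt, pv_B_offsets, List.map_map, Function.comp_def]
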